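-- pv_equiv track=rewrite | github.com/ishikaa-gupta/Line-Encoder | datacomm.py | scr_b8zs
-- ===== SOURCE A (Python) =====
-- def scr_b8zs(array):
--     pulse = True
--     zeros = 0
--     b8zs = []
--     for x in array:
--         if x=='1':
--             b8zs.append(1) if pulse else b8zs.append(-1)
--             pulse = not(pulse)
--             zeros = 0
--         else:
--             b8zs.append(0)
--             zeros += 1
--             if zeros >= 8:
--                 b8zs[-5] = 1 if not(pulse) else -1
--                 b8zs[-4] = 1 if pulse else -1
--                 b8zs[-2] = 1 if pulse else -1
--                 b8zs[-1] = 1 if not(pulse) else -1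
--                 zeros = 0
--     return b8zs
-- ===== SOURCE B (Python) =====
-- def scr_b8zs(array):
--     # Buffered emission: zeros are held in a run counter and flushed as whole
--     # blocks, so no element of the output is ever overwritten.
--     out = []
--     pulse = True
--     run = 0
--     for x in array:
--         if x == '1':
--             out.extend([0] * run)
--             run = 0
--             out.append(1 if pulse else -1)
--             pulse = not pulse
--         else:
--             run += 1
--             if run == 8:
--                 v = -1 if pulse else 1
--                 b = 1 if pulse else -1
--                 out.extend([0, 0, 0, v, b, 0, b, v])
--                 run = 0
--     out.extend([0] * run)
--     return out
-- ===== Notes on version B (the rewrite author's own statement) =====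
-- stated objective: alternative
-- what changed: B buffers each zero-run in a counter and emits whole blocks (the 8-zero substitution block or the pending plain zeros) when the run completes, so the output is built strictly append-only, instead of A's appending every zero and destructively overwriting four earlier slots by negative indexing.
import Mathlib
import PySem

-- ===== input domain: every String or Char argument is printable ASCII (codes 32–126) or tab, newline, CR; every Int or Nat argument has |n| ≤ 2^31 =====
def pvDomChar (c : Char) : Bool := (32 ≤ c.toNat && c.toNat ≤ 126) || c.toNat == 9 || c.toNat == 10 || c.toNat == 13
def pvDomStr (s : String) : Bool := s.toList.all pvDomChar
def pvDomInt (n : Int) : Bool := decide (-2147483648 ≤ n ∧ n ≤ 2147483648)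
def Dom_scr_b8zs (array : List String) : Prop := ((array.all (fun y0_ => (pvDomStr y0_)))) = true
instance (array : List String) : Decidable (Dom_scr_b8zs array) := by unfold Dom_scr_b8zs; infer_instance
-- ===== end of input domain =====

-- B builds the output append-only (zero runs buffered in a counter, blocks emitted whole)
-- instead of A's append-one-zero-then-overwrite-by-negative-index; same values everywhere.

-- ===== PORT A =====
-- one loop step of A: state = (pulse, zeros, b8zs); negative indices -5,-4,-2,-1
-- become length-5 … length-1 (in range: zeros ≥ 8 guarantees length ≥ 8)
def scrA_step (s : Bool × Nat × List Int) (x : String) : Bool × Nat × List Int :=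
  let (pulse, zeros, b8zs) := s
  if x = "1" then
    (!pulse, 0, b8zs ++ [if pulse then 1 else -1])
  else
    let b8zs := b8zs ++ [0]
    let zeros := zeros + 1
    if zeros ≥ 8 then
      let n := b8zs.length
      let b8zs := b8zs.set (n - 5) (if !pulse then 1 else -1)
      let b8zs := b8zs.set (n - 4) (if pulse then 1 else -1)
      let b8zs := b8zs.set (n - 2) (if pulse then 1 else -1)
      let b8zs := b8zs.set (n - 1) (if !pulse then 1 else -1)
      (pulse, 0, b8zs)
    else
      (pulse, zeros, b8zs)

def scr_b8zs (array : List String) : List Int :=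
  (array.foldl scrA_step (true, 0, [])).2.2

-- ===== PORT B =====
-- one loop step of B: state = (pulse, run, out); out only ever grows
def scrB_step (s : Bool × Nat × List Int) (x : String) : Bool × Nat × List Int :=
  let (pulse, run, out) := s
  if x = "1" then
    (!pulse, 0, (out ++ List.replicate run 0) ++ [if pulse then 1 else -1])
  else
    let run := run + 1
    if run = 8 then
      let v : Int := if pulse then -1 else 1
      let b : Int := if pulse then 1 else -1
      (pulse, 0, out ++ [0, 0, 0, v, b, 0, b, v])
    else
      (pulse, run, out)

def scr_b8zs_alt (array : List String) : List Int :=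
  let st := array.foldl scrB_step (true, 0, [])
  st.2.2 ++ List.replicate st.2.1 0

-- ===== PRECONDITION & SPEC =====
def Spec_scr_b8zs (array : List String) (out : List Int) : Prop := out = scr_b8zs_alt array
instance (array : List String) (out : List Int) : Decidable (Spec_scr_b8zs array out) := by unfold Spec_scr_b8zs; infer_instance

-- ===== CLAIM (what is proved, stated in full; the proofs are below) =====
def Claim_equal_scr_b8zs : Prop := ∀ (array : List String), Dom_scr_b8zs array → Spec_scr_b8zs array (scr_b8zs array)

-- ===== LEMMAS AND PROOFS =====

-- coupling invariant between the two loop states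
def stRel (a b : Bool × Nat × List Int) : Prop :=
  a.1 = b.1 ∧ a.2.1 = b.2.1 ∧ a.2.1 < 8 ∧ a.2.2 = b.2.2 ++ List.replicate b.2.1 0

lemma set_block (o : List Int) (a b c d : Int) :
    ((((o ++ ([0, 0, 0, 0, 0, 0, 0, 0] : List Int)).set (o.length + 3) a).set
        (o.length + 4) b).set (o.length + 6) c).set (o.length + 7) d
      = o ++ [0, 0, 0, a, b, 0, c, d] := by
  induction o with
  | nil => rfl
  | cons x xs ih =>
    simp only [List.cons_append, List.length_cons,
      show xs.length + 1 + 3 = (xs.length + 3) + 1 from by omega,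
      show xs.length + 1 + 4 = (xs.length + 4) + 1 from by omega,
      show xs.length + 1 + 6 = (xs.length + 6) + 1 from by omega,
      show xs.length + 1 + 7 = (xs.length + 7) + 1 from by omega,
      List.set_cons_succ]
    rw [ih]

lemma stRel_step (a b : Bool × Nat × List Int) (x : String) (h : stRel a b) :
    stRel (scrA_step a x) (scrB_step b x) := by
  obtain ⟨p, z, l⟩ := a
  obtain ⟨p', r, o⟩ := b
  obtain ⟨hp, hz, hlt, hl⟩ := h
  simp only at hp hz hlt hl
  subst hp hz hl
  by_cases hx : x = "1"
  · simp [scrA_step, scrB_step, hx, stRel, List.append_assoc]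
  · simp only [scrA_step, scrB_step, hx, if_false]
    by_cases h8 : z + 1 = 8
    · have h7 : z = 7 := by omega
      subst h7
      rw [if_pos (show (7 : Nat) + 1 ≥ 8 from by omega),
          if_pos (show (7 : Nat) + 1 = 8 from rfl)]
      refine ⟨rfl, rfl, by simp, ?_⟩
      have e2 : o ++ List.replicate 7 (0 : Int) ++ [0]
          = o ++ ([0, 0, 0, 0, 0, 0, 0, 0] : List Int) := by
        rw [List.append_assoc]; rfl
      rw [e2, show (o ++ ([0, 0, 0, 0, 0, 0, 0, 0] : List Int)).length = o.length + 8 from by simp,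
          show o.length + 8 - 5 = o.length + 3 from by omega,
          show o.length + 8 - 4 = o.length + 4 from by omega,
          show o.length + 8 - 2 = o.length + 6 from by omega,
          show o.length + 8 - 1 = o.length + 7 from by omega,
          set_block]
      cases p <;> simp
    · have h8' : ¬ (z + 1 ≥ 8) := by omega
      rw [if_neg h8', if_neg h8]
      refine ⟨rfl, rfl, by simp; omega, ?_⟩
      rw [List.append_assoc, ← List.replicate_succ']

lemma stRel_foldl (l : List String) (a b : Bool × Nat × List Int) (h : stRel a b) :
    stRel (l.foldl scrA_step a) (l.foldl scrB_step b) := by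
  induction l generalizing a b with
  | nil => exact h
  | cons x xs ih => exact ih _ _ (stRel_step a b x h)

-- ===== VERDICT (by name: the statement is the Claim_ definition above) =====
theorem scr_b8zs_spec : Claim_equal_scr_b8zs := by
  intro array _
  have h := stRel_foldl array (true, 0, []) (true, 0, []) (by simp [stRel])
  unfold Spec_scr_b8zs scr_b8zs scr_b8zs_alt
  exact h.2.2.2
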